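-- pv_equiv track=rewrite | github.com/yymao/adstex | adstex.py | format_author
-- ===== SOURCE A (Python) =====
-- def format_author(authors, max_char):
--     s = authors[0]
--     for author in authors[1:]:
--         if len(s) + len(author) + 2 < max_char - 7:
--             s = u"{}; {}".format(s, author)
--         else:
--             break
--     else:
--         return s
--     return s + u" et al."
-- ===== SOURCE B (Python) =====
-- def format_author(authors, max_char):
--     # prefix-sum table of display lengths: cum[i] = len("; ".join(authors[:i+1]))
--     cum = [len(authors[0])]
--     for a in authors[1:]:
--         cum.append(cum[-1] + len(a) + 2)
--     limit = max_char - 7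
--     # cum is strictly increasing, so binary-search the first index >= limit (clamped to >= 1)
--     lo, hi = 1, len(cum)
--     while lo < hi:
--         mid = (lo + hi) // 2
--         if cum[mid] < limit:
--             lo = mid + 1
--         else:
--             hi = mid
--     head = "; ".join(authors[:lo])
--     return head if lo == len(authors) else head + " et al."
-- ===== Notes on version B (the rewrite author's own statement) =====
-- stated objective: faster
-- what changed: Replaces A's accumulate-and-rebuild loop (repeated string concatenation) with a prefix-sum table of cumulative display lengths plus a hand-written binary search for the cutoff index, followed by a single join of the kept prefix.
import Mathlib
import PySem

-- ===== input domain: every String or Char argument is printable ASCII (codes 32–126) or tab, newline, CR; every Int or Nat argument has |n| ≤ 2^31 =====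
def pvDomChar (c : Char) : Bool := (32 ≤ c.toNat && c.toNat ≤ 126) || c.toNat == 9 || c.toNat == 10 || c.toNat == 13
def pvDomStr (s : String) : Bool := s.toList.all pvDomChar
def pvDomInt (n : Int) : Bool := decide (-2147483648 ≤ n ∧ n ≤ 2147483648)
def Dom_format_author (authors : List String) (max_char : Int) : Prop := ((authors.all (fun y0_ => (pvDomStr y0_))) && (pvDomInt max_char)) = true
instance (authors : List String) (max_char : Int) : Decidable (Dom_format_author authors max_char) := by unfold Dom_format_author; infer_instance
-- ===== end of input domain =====

-- B replaces A's accumulate-and-rebuild loop by a prefix-sum table of cumulative display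
-- lengths plus a binary search for the cutoff index (objective: alternative decomposition).

-- ===== PORT A =====
-- the for-loop of A: state s, early return 's + " et al."' on break
def faLoop (max_char : Int) (s : String) (rest : List String) : String :=
  match rest with
  | [] => s
  | author :: t =>
    if PySem.Str.len s + PySem.Str.len author + 2 < max_char - 7 then
      faLoop max_char (s ++ "; " ++ author) t
    else
      s ++ " et al."

def format_author (authors : List String) (max_char : Int) : String :=
  match authors with
  | [] => ""   -- authors[0] raises IndexError in Python; excluded by Pre_
  | a0 :: rest => faLoop max_char a0 rest

-- ===== PORT B =====
-- cum.append(cum[-1] + len(a) + 2)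
def cumStep (cum : List Int) (a : String) : List Int :=
  cum ++ [PySem.List.pyGetD cum (-1) 0 + PySem.Str.len a + 2]

-- the while-loop of Source B's hand-written binary search (cum[mid] is always in range here)
def bsearchCut (cum : List Int) (limit : Int) (lo hi : Nat) : Nat :=
  if h : lo < hi then
    if PySem.List.pyGetD cum (((lo + hi) / 2 : Nat) : Int) 0 < limit then
      bsearchCut cum limit ((lo + hi) / 2 + 1) hi
    else
      bsearchCut cum limit lo ((lo + hi) / 2)
  else lo
termination_by hi - lo
decreasing_by all_goals omega

def format_author_alt (authors : List String) (max_char : Int) : String :=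
  match authors with
  | [] => ""   -- excluded by Pre_
  | a0 :: rest =>
    let cum := rest.foldl cumStep [PySem.Str.len a0]
    let limit := max_char - 7
    let k := bsearchCut cum limit 1 cum.length
    let head := PySem.Str.join "; " ((a0 :: rest).take k)
    if k = (a0 :: rest).length then head else head ++ " et al."

-- ===== PRECONDITION & SPEC =====
-- Pre_ excludes only the empty author list, on which A raises IndexError (authors[0]).
def Pre_format_author (authors : List String) (max_char : Int) : Prop := authors ≠ []
instance (authors : List String) (max_char : Int) : Decidable (Pre_format_author authors max_char) := by unfold Pre_format_author; infer_instance
def pvWitness_format_author : List String × Int := (["Ann A.", "Bob B."], 30)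

def Spec_format_author (authors : List String) (max_char : Int) (out : String) : Prop := out = format_author_alt authors max_char
instance (authors : List String) (max_char : Int) (out : String) : Decidable (Spec_format_author authors max_char out) := by unfold Spec_format_author; infer_instance

-- ===== CLAIM (what is proved, stated in full; the proofs are below) =====
def Claim_equal_format_author : Prop := ∀ (authors : List String) (max_char : Int), Dom_format_author authors max_char → Pre_format_author authors max_char → Spec_format_author authors max_char (format_author authors max_char)

-- ===== LEMMAS AND PROOFS =====

-- linear cutoff count: how many of `rest` A's loop appends when the running length is c
def linK (limit c : Int) (rest : List String) : Nat :=
  match rest with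
  | [] => 0
  | a :: t =>
    if c + PySem.Str.len a + 2 < limit then linK limit (c + PySem.Str.len a + 2) t + 1 else 0

-- structural form of the prefix-sum table
def cums (c : Int) (rest : List String) : List Int :=
  match rest with
  | [] => [c]
  | a :: t => c :: cums (c + PySem.Str.len a + 2) t

def joinAcc (s : String) (xs : List String) : String :=
  xs.foldl (fun acc a => acc ++ "; " ++ a) s

theorem cums_head (c : Int) (rest : List String) : ∃ t, cums c rest = c :: t := by
  cases rest <;> simp [cums]

theorem length_cums (c : Int) (rest : List String) : (cums c rest).length = rest.length + 1 := by
  induction rest generalizing c with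
  | nil => simp [cums]
  | cons a t ih => simp [cums, ih]

theorem foldl_cumStep (rest : List String) (pre : List Int) (c : Int) :
    rest.foldl cumStep (pre ++ [c]) = pre ++ cums c rest := by
  induction rest generalizing pre c with
  | nil => simp [cums]
  | cons a t ih =>
    show t.foldl cumStep (cumStep (pre ++ [c]) a) = _
    rw [cumStep, PySem.List.pyGetD_neg_one_append_singleton]
    rw [ih (pre ++ [c]) _]
    simp [cums]

theorem linK_le (limit c : Int) (rest : List String) : linK limit c rest ≤ rest.length := by
  induction rest generalizing c with
  | nil => simp [linK]
  | cons a t ih =>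
    rw [linK]
    split
    · simpa using ih _
    · simp

theorem cums_getD_ge (c : Int) (rest : List String) (j : Nat) (hj : j ≤ rest.length) :
    c ≤ (cums c rest).getD j 0 := by
  induction rest generalizing c j with
  | nil =>
    have hj0 : j = 0 := by simpa using hj
    subst hj0; simp [cums]
  | cons a t ih =>
    cases j with
    | zero => simp [cums]
    | succ j =>
      rw [cums]
      simp only [List.getD_cons_succ]
      have h1 := ih (c + PySem.Str.len a + 2) j (by simpa using hj)
      have h2 : (0:Int) ≤ PySem.Str.len a := by simp [PySem.Str.len_eq]
      omega

theorem cums_getD_lt (limit c : Int) (rest : List String) (i : Nat)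
    (h1 : 1 ≤ i) (h2 : i ≤ linK limit c rest) :
    (cums c rest).getD i 0 < limit := by
  induction rest generalizing c i with
  | nil => rw [linK] at h2; omega
  | cons a t ih =>
    rw [linK] at h2
    by_cases hc : c + PySem.Str.len a + 2 < limit
    · rw [if_pos hc] at h2
      rw [cums]
      cases i with
      | zero => omega
      | succ i =>
        simp only [List.getD_cons_succ]
        cases Nat.eq_zero_or_pos i with
        | inl h0 =>
          subst h0
          obtain ⟨t', ht'⟩ := cums_head (c + PySem.Str.len a + 2) t
          rw [ht']; simpa using hc
        | inr hpos => exact ih _ _ hpos (by omega)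
    · rw [if_neg hc] at h2; omega

theorem cums_getD_ge_limit (limit c : Int) (rest : List String) (i : Nat)
    (h1 : linK limit c rest + 1 ≤ i) (h2 : i ≤ rest.length) :
    ¬ (cums c rest).getD i 0 < limit := by
  induction rest generalizing c i with
  | nil => simp [linK] at h1 h2; omega
  | cons a t ih =>
    rw [linK] at h1
    by_cases hc : c + PySem.Str.len a + 2 < limit
    · rw [if_pos hc] at h1
      cases i with
      | zero => omega
      | succ i =>
        rw [cums]; simp only [List.getD_cons_succ]
        exact ih _ _ (by omega) (by simpa using h2)
    · rw [if_neg hc] at h1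
      cases i with
      | zero => omega
      | succ i =>
        rw [cums]; simp only [List.getD_cons_succ]
        have := cums_getD_ge (c + PySem.Str.len a + 2) t i (by simpa using h2)
        omega

-- binary search finds the (unique) cut point once everything left of it tests < limit
-- and everything from it on (below hi) does not
theorem bsearchCut_eq (cum : List Int) (limit : Int) (lo hi cut : Nat)
    (hlc : lo ≤ cut) (hch : cut ≤ hi) (hh : hi ≤ cum.length)
    (hlt : ∀ i, lo ≤ i → i < cut → PySem.List.pyGetD cum (i : Int) 0 < limit)
    (hge : ∀ i, cut ≤ i → i < hi → ¬ PySem.List.pyGetD cum (i : Int) 0 < limit) :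
    bsearchCut cum limit lo hi = cut := by
  induction lo, hi using bsearchCut.induct cum limit with
  | case1 lo hi h hmid ih =>
    rw [bsearchCut, dif_pos h, if_pos hmid]
    have hmlt : (lo + hi) / 2 < cut := by
      by_contra hcon
      exact hge _ (by omega) (by omega) hmid
    exact ih (by omega) hch hh (fun i hi1 hi2 => hlt i (by omega) hi2) hge
  | case2 lo hi h hmid ih =>
    rw [bsearchCut, dif_pos h, if_neg hmid]
    have hmge : cut ≤ (lo + hi) / 2 := by
      by_contra hcon
      exact hmid (hlt _ (by omega) (by omega))
    exact ih hlc hmge (by omega) hlt (fun i hi1 hi2 => hge i hi1 (by omega))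
  | case3 lo hi h =>
    rw [bsearchCut, dif_neg h]
    omega

theorem pyGetD_cums_natCast (c : Int) (rest : List String) (i : Nat) :
    PySem.List.pyGetD (cums c rest) (i : Int) 0 = (cums c rest).getD i 0 := by
  exact PySem.List.pyGetD_natCast _ _ _

theorem bsearch_cums (limit c : Int) (rest : List String) :
    bsearchCut (cums c rest) limit 1 (cums c rest).length = linK limit c rest + 1 := by
  apply bsearchCut_eq
  · omega
  · rw [length_cums]; have := linK_le limit c rest; omega
  · rfl
  · intro i h1 h2
    rw [pyGetD_cums_natCast]
    exact cums_getD_lt limit c rest i h1 (by omega)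
  · intro i h1 h2
    rw [pyGetD_cums_natCast]
    rw [length_cums] at h2
    exact cums_getD_ge_limit limit c rest i h1 (by omega)

-- A's loop returns the joined k-prefix, plus " et al." exactly when it broke early
theorem faLoop_eq (max_char : Int) (rest : List String) (s : String) :
    faLoop max_char s rest =
      (if linK (max_char - 7) (PySem.Str.len s) rest = rest.length
       then joinAcc s (rest.take (linK (max_char - 7) (PySem.Str.len s) rest))
       else joinAcc s (rest.take (linK (max_char - 7) (PySem.Str.len s) rest)) ++ " et al.") := by
  induction rest generalizing s with
  | nil => simp [faLoop, linK, joinAcc]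
  | cons a t ih =>
    rw [faLoop, linK]
    by_cases hc : PySem.Str.len s + PySem.Str.len a + 2 < max_char - 7
    · rw [if_pos hc, if_pos hc, ih]
      have hlen : PySem.Str.len (s ++ "; " ++ a) = PySem.Str.len s + PySem.Str.len a + 2 := by
        rw [PySem.Str.len_append, PySem.Str.len_append]
        have : PySem.Str.len "; " = 2 := by decide
        omega
      rw [hlen]
      have hj : ∀ k, joinAcc (s ++ "; " ++ a) (t.take k) = joinAcc s ((a :: t).take (k + 1)) := by
        intro k; simp [joinAcc]
      by_cases he : linK (max_char - 7) (PySem.Str.len s + PySem.Str.len a + 2) t = t.length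
      · rw [if_pos he, if_pos (by simp only [PySem.Str.len_eq, String.length_toList, List.length_cons] at he ⊢; omega), hj]
      · rw [if_neg he, if_neg (by simp only [PySem.Str.len_eq, String.length_toList, List.length_cons] at he ⊢; omega), hj]
    · rw [if_neg hc, if_neg hc]
      rw [if_neg (by simp)]
      simp [joinAcc]

-- a fold over the accumulator distributes over a string prefix of the seed
theorem joinAcc_prefix (xs : List String) (p q : String) :
    (joinAcc (p ++ q) xs).toList = p.toList ++ (joinAcc q xs).toList := by
  induction xs generalizing p q with
  | nil => simp [joinAcc]
  | cons x xs ih =>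
    show (joinAcc ((p ++ q) ++ "; " ++ x) xs).toList = _
    rw [show (p ++ q) ++ "; " ++ x = p ++ (q ++ "; " ++ x) from String.toList_inj.mp (by simp), ih]
    rfl

-- joining a taken prefix with "; " is A's fold over the accumulator
theorem join_take (a0 : String) (rest : List String) (k : Nat) :
    PySem.Str.join "; " ((a0 :: rest).take (k + 1)) = joinAcc a0 (rest.take k) := by
  induction rest generalizing a0 k with
  | nil =>
    apply String.toList_inj.mp
    simp [PySem.Str.toList_join, PySem.Chars.join, List.intercalate, joinAcc]
  | cons b t ih =>
    cases k with
    | zero =>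
      apply String.toList_inj.mp
      simp [PySem.Str.toList_join, PySem.Chars.join, List.intercalate, joinAcc]
    | succ k =>
      simp only [List.take_succ_cons]
      have hR := ih b k
      rw [List.take_succ_cons] at hR
      have hL : (PySem.Str.join "; " (a0 :: b :: t.take k)).toList
          = a0.toList ++ "; ".toList ++ (PySem.Str.join "; " (b :: t.take k)).toList := by
        rw [PySem.Str.toList_join, List.map_cons, List.map_cons, PySem.Chars.join_cons_cons,
          ← List.map_cons, ← PySem.Str.toList_join]
      apply String.toList_inj.mp
      rw [hL, hR]
      have h5 : joinAcc a0 (b :: t.take k) = joinAcc ((a0 ++ "; ") ++ b) (t.take k) := by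
        simp [joinAcc]
      rw [h5, joinAcc_prefix, String.toList_append]

-- ===== VERDICT (by name: the statement is the Claim_ definition above) =====
theorem format_author_spec : Claim_equal_format_author := by
  intro authors max_char _hdom hpre
  unfold Spec_format_author
  match authors with
  | [] => exact absurd rfl hpre
  | a0 :: rest =>
    show faLoop max_char a0 rest =
      (let cum := rest.foldl cumStep [PySem.Str.len a0]
       let limit := max_char - 7
       let k := bsearchCut cum limit 1 cum.length
       let head := PySem.Str.join "; " ((a0 :: rest).take k)
       if k = (a0 :: rest).length then head else head ++ " et al.")
    have hc0 := foldl_cumStep rest [] (PySem.Str.len a0)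
    rw [List.nil_append] at hc0
    simp only [hc0, List.nil_append]
    rw [bsearch_cums (max_char - 7) (PySem.Str.len a0) rest]
    rw [join_take, faLoop_eq]
    have hlen : (a0 :: rest).length = rest.length + 1 := rfl
    by_cases he : linK (max_char - 7) (PySem.Str.len a0) rest = rest.length
    · rw [if_pos he, if_pos (by omega)]
    · rw [if_neg he, if_neg (by omega)]
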